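-- pv_equiv track=rewrite | github.com/fjsnow/aoc-2024 | days/7/solve.py | is_goal_possible
-- ===== SOURCE A (Python) =====
-- def is_goal_possible(goal, numbers, p2):
--     stack = [(numbers[0], 0)]
--     while stack:
--         current, index = stack.pop()
--         if index == len(numbers) - 1:
--             if current == goal:
--                 return True
--             continue
--
--         number = numbers[index + 1]
--
--         plus = current + number
--         if plus <= goal:
--             stack.append((plus, index + 1))
--         times = current * number
--         if times <= goal:
--             stack.append((times, index + 1))
--         if p2:
--             concat = current * (10 ** len(str(number))) + number
--             if concat <= goal:
--                 stack.append((concat, index + 1))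
--     return False
-- ===== SOURCE B (Python) =====
-- def is_goal_possible(goal, numbers, p2):
--     # Level-by-level set of reachable values (deduplicated), instead of an explicit DFS stack.
--     reachable = {numbers[0]}
--     for number in numbers[1:]:
--         nxt = set()
--         shift = 10 ** len(str(number))
--         for c in reachable:
--             cands = (c + number, c * number, c * shift + number) if p2 else (c + number, c * number)
--             for v in cands:
--                 if v <= goal:
--                     nxt.add(v)
--         reachable = nxt
--     return goal in reachable
-- ===== Notes on version B (the rewrite author's own statement) =====
-- stated objective: alternative
-- what changed: Replaces A's depth-first explicit stack over (value, index) states by a breadth-first level-by-level computation of the SET of reachable values (deduplicated per level), returning whether the goal is in the final set.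
import Mathlib
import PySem

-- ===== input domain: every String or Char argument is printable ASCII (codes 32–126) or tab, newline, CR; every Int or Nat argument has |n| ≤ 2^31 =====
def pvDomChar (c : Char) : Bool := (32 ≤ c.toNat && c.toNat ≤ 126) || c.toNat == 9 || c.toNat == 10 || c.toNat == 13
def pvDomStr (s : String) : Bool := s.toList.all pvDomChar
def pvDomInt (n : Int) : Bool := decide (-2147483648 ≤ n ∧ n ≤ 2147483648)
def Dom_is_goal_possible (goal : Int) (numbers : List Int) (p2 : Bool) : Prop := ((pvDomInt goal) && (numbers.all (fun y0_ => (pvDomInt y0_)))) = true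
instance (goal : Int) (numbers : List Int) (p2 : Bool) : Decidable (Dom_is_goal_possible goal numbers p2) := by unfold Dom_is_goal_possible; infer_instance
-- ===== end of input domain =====

-- B replaces A's depth-first explicit stack by a level-by-level reachable-value SET (deduplicated per level); return value only, no side effects.

-- ===== PORT A =====
-- A's stack entries (current, index) are ported as (current, remaining suffix of numbers):
-- 'index' ↔ 'numbers.drop (index+1)', the same values in the same order; 'index == len(numbers)-1'
-- ↔ the suffix is empty, 'numbers[index+1]' ↔ the head of the suffix (always in range in Python
-- by the same invariant). The stack's top is the list head; appends prepend in append order, so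
-- the last append ends on top, exactly Python's list.append/pop.
def aLoop (goal : Int) (p2 : Bool) (stack : List (Int × List Int)) : Bool :=
  match stack with
  | [] => false
  | (current, rest) :: s =>
    match rest with
    | [] =>
      if current == goal then true
      else aLoop goal p2 s
    | number :: rest' =>
      let plus := current + number
      let s1 := if plus ≤ goal then (plus, rest') :: s else s
      let times := current * number
      let s2 := if times ≤ goal then (times, rest') :: s1 else s1
      let s3 :=
        if p2 then
          let concat := current * (10 ^ (PySem.Int.toChars number).length) + number
          if concat ≤ goal then (concat, rest') :: s2 else s2
        else s2
      aLoop goal p2 s3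
  termination_by (stack.map (fun p => 4 ^ p.2.length)).sum
  decreasing_by
  · simp
  · have hpow : 0 < 4 ^ rest'.length := Nat.pow_pos (by norm_num)
    simp only [List.length_cons, List.map_cons, List.sum_cons, pow_succ]
    split_ifs <;> first | omega | (simp only [List.map_cons, List.sum_cons]; omega)

def is_goal_possible (goal : Int) (numbers : List Int) (p2 : Bool) : Bool :=
  match numbers with
  | [] => false  -- Python raises IndexError at numbers[0]; excluded by Pre_
  | x :: rest => aLoop goal p2 [(x, rest)]

-- ===== PORT B =====
-- one level: from the set 'reachable', the set of all candidate values ≤ goal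
def bStep (goal : Int) (p2 : Bool) (reachable : PySem.Set Int) (number : Int) : PySem.Set Int :=
  let shift : Int := 10 ^ (PySem.Int.toChars number).length
  reachable.foldl
    (fun nxt c =>
      (if p2 then [c + number, c * number, c * shift + number] else [c + number, c * number]).foldl
        (fun nxt v => if v ≤ goal then PySem.Set.add nxt v else nxt) nxt)
    PySem.Set.empty

def is_goal_possible_alt (goal : Int) (numbers : List Int) (p2 : Bool) : Bool :=
  match numbers with
  | [] => false  -- Source B raises IndexError at numbers[0]; excluded by Pre_
  | x :: rest =>
    let final := rest.foldl (fun reachable number => bStep goal p2 reachable number) (PySem.Set.ofList [x])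
    PySem.Set.contains final goal

-- ===== PRECONDITION & SPEC =====
-- Pre_ excludes only the empty list, on which both Pythons raise IndexError at numbers[0].
def Pre_is_goal_possible (goal : Int) (numbers : List Int) (p2 : Bool) : Prop := numbers ≠ []
instance (goal : Int) (numbers : List Int) (p2 : Bool) : Decidable (Pre_is_goal_possible goal numbers p2) := by unfold Pre_is_goal_possible; infer_instance
def pvWitness_is_goal_possible : Int × List Int × Bool := (6, [2, 3], false)

def Spec_is_goal_possible (goal : Int) (numbers : List Int) (p2 : Bool) (out : Bool) : Prop := out = is_goal_possible_alt goal numbers p2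
instance (goal : Int) (numbers : List Int) (p2 : Bool) (out : Bool) : Decidable (Spec_is_goal_possible goal numbers p2 out) := by unfold Spec_is_goal_possible; infer_instance

-- ===== CLAIM (what is proved, stated in full; the proofs are below) =====
def Claim_equal_is_goal_possible : Prop := ∀ (goal : Int) (numbers : List Int) (p2 : Bool), Dom_is_goal_possible goal numbers p2 → Pre_is_goal_possible goal numbers p2 → Spec_is_goal_possible goal numbers p2 (is_goal_possible goal numbers p2)

-- ===== LEMMAS AND PROOFS =====

-- the candidate successor values of c over the next number (A's three pushes, B's tuple)
def cands (p2 : Bool) (number c : Int) : List Int :=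
  if p2 then [c + number, c * number, c * (10 ^ (PySem.Int.toChars number).length) + number]
  else [c + number, c * number]

-- common characterisation: goal reachable from c over the suffix with every pushed value ≤ goal
def reachB (goal : Int) (p2 : Bool) : List Int → Int → Bool
  | [], c => c == goal
  | n :: rest, c => (cands p2 n c).any (fun v => decide (v ≤ goal) && reachB goal p2 rest v)

lemma any_push {P : Prop} [Decidable P] (x : Int × List Int) (l : List (Int × List Int))
    (f : Int × List Int → Bool) :
    ((if P then x :: l else l).any f) = ((decide P && f x) || l.any f) := by
  split <;> simp [*]

lemma aLoop_eq_any (goal : Int) (p2 : Bool) : ∀ (stack : List (Int × List Int)),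
    aLoop goal p2 stack = stack.any (fun pr => reachB goal p2 pr.2 pr.1)
  | [] => by simp [aLoop]
  | (current, []) :: s => by
    rw [aLoop, aLoop_eq_any goal p2 s]
    by_cases h : current == goal <;> simp [reachB, h]
  | (current, number :: rest') :: s => by
    rw [aLoop, aLoop_eq_any goal p2]
    cases p2 <;>
      (simp only [Bool.false_eq_true, if_false, if_true]
       simp only [any_push]
       simp [reachB, cands, List.any_cons, List.any_nil, Bool.or_comm, Bool.or_left_comm,
         Bool.or_assoc, Bool.and_comm])
  termination_by stack => ((stack.map (fun p => 4 ^ p.2.length)).sum)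
  decreasing_by
  · simp
  · have hpow : 0 < 4 ^ rest'.length := Nat.pow_pos (by norm_num)
    simp only [List.length_cons, List.map_cons, List.sum_cons, pow_succ]
    split_ifs <;> first | omega | (simp only [List.map_cons, List.sum_cons]; omega)

lemma mem_inner (goal : Int) (l : List Int) : ∀ (acc : PySem.Set Int) (v : Int),
    (v ∈ l.foldl (fun nxt v => if v ≤ goal then PySem.Set.add nxt v else nxt) acc)
      ↔ v ∈ acc ∨ (v ∈ l ∧ v ≤ goal) := by
  induction l with
  | nil => simp
  | cons x l ih =>
    intro acc v
    simp only [List.foldl_cons, ih, List.mem_cons]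
    by_cases h : x ≤ goal
    · simp only [if_pos h, PySem.Set.mem_add]
      constructor
      · rintro ((hv | rfl) | ⟨hl, hle⟩)
        · exact Or.inl hv
        · exact Or.inr ⟨Or.inl rfl, h⟩
        · exact Or.inr ⟨Or.inr hl, hle⟩
      · rintro (hv | ⟨rfl | hl, hle⟩)
        · exact Or.inl (Or.inl hv)
        · exact Or.inl (Or.inr rfl)
        · exact Or.inr ⟨hl, hle⟩
    · simp only [if_neg h]
      constructor
      · rintro (hv | ⟨hl, hle⟩)
        · exact Or.inl hv
        · exact Or.inr ⟨Or.inr hl, hle⟩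
      · rintro (hv | ⟨rfl | hl, hle⟩)
        · exact Or.inl hv
        · exact absurd hle h
        · exact Or.inr ⟨hl, hle⟩

lemma mem_bStep (goal n : Int) (p2 : Bool) (r : PySem.Set Int) (v : Int) :
    v ∈ bStep goal p2 r n ↔ ∃ c ∈ r, v ∈ cands p2 n c ∧ v ≤ goal := by
  have key : ∀ (rl : List Int) (acc : PySem.Set Int),
      (v ∈ rl.foldl (fun nxt c =>
          (cands p2 n c).foldl (fun nxt v => if v ≤ goal then PySem.Set.add nxt v else nxt) nxt) acc)
        ↔ v ∈ acc ∨ ∃ c ∈ rl, v ∈ cands p2 n c ∧ v ≤ goal := by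
    intro rl
    induction rl with
    | nil => simp
    | cons c rl ih =>
      intro acc
      simp only [List.foldl_cons, ih, mem_inner, List.mem_cons]
      aesop
  have hb : bStep goal p2 r n
      = r.foldl (fun nxt c =>
          (cands p2 n c).foldl (fun nxt v => if v ≤ goal then PySem.Set.add nxt v else nxt) nxt)
        PySem.Set.empty := by
    simp only [bStep, cands]
  rw [hb, key]
  simp [PySem.Set.empty]

lemma foldl_contains (goal : Int) (p2 : Bool) (rest : List Int) : ∀ (r : PySem.Set Int),
    PySem.Set.contains (rest.foldl (fun reachable number => bStep goal p2 reachable number) r) goal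
      = r.any (fun c => reachB goal p2 rest c) := by
  induction rest with
  | nil =>
    intro r
    rw [Bool.eq_iff_iff]
    simp only [List.foldl_nil, PySem.Set.contains_iff, List.any_eq_true, reachB, beq_iff_eq]
    constructor
    · intro h; exact ⟨goal, h, rfl⟩
    · rintro ⟨c, hc, rfl⟩; exact hc
  | cons n rest ih =>
    intro r
    simp only [List.foldl_cons, ih]
    rw [Bool.eq_iff_iff]
    simp only [List.any_eq_true, mem_bStep, reachB, decide_eq_true_eq, Bool.and_eq_true]
    constructor
    · rintro ⟨v, ⟨c, hc, hv, hle⟩, hr⟩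
      exact ⟨c, hc, v, hv, ⟨hle, hr⟩⟩
    · rintro ⟨c, hc, v, hv, hle, hr⟩
      exact ⟨v, ⟨c, hc, hv, hle⟩, hr⟩

-- ===== VERDICT (by name: the statement is the Claim_ definition above) =====
theorem is_goal_possible_spec : Claim_equal_is_goal_possible := by
  intro goal numbers p2 _ hpre
  unfold Spec_is_goal_possible
  cases numbers with
  | nil => exact absurd rfl hpre
  | cons x rest =>
    simp only [is_goal_possible, is_goal_possible_alt]
    rw [aLoop_eq_any, foldl_contains]
    simp [PySem.Set.ofList, PySem.Set.add, PySem.Set.empty]
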